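-- pv_equiv track=rewrite | github.com/shankcal/SummerResearch | TestingArea.py | findMaximalPoints
-- ===== SOURCE A (Python) =====
-- def findMaximalPoints(pointList):
--     maximalPoints = []
--
--     for maximalPointCandidate in pointList:
--         foundGreaterPoint = False
--         for otherPoint in pointList:
--             if otherPoint > maximalPointCandidate:
--                 foundGreaterPoint = True
--                 break
--         if not foundGreaterPoint:
--             maximalPoints.append(maximalPointCandidate)
--
--     return maximalPoints
-- ===== SOURCE B (Python) =====
-- def findMaximalPoints(pointList):
--     if not pointList:
--         return []
--     best = pointList[0]
--     for x in pointList[1:]: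
--         if x > best:
--             best = x
--     return [x for x in pointList if x == best]
-- ===== Notes on version B (the rewrite author's own statement) =====
-- stated objective: faster
-- what changed: Replaced the nested all-pairs dominance scan by a single pass computing the maximum followed by one filter collecting its occurrences.
import Mathlib
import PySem

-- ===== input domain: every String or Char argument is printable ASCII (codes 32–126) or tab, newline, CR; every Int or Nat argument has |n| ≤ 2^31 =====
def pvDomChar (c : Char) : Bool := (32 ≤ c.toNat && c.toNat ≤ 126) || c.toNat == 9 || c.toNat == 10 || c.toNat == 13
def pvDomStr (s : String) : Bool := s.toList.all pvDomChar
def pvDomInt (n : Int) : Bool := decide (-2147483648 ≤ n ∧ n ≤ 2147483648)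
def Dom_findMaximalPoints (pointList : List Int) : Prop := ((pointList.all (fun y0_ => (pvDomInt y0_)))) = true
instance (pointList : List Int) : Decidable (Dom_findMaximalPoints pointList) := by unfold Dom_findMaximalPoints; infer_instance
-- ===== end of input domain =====

-- B replaces A's O(n^2) all-pairs dominance scan by one max pass plus one filter (faster, asymptotic).
-- ===== PORT A =====
-- outer loop with accumulator; the inner break-loop is the short-circuiting List.any
def findMaximalPoints (pointList : List Int) : List Int :=
  pointList.foldl
    (fun maximalPoints maximalPointCandidate =>
      let foundGreaterPoint := pointList.any (fun otherPoint => otherPoint > maximalPointCandidate)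
      if !foundGreaterPoint then maximalPoints ++ [maximalPointCandidate] else maximalPoints)
    []

-- ===== PORT B =====
def findMaximalPoints_alt (pointList : List Int) : List Int :=
  match pointList with
  | [] => []
  | p0 :: rest =>
    let best := rest.foldl (fun best x => if x > best then x else best) p0
    pointList.filter (fun x => x == best)

-- ===== PRECONDITION & SPEC =====
def Spec_findMaximalPoints (pointList : List Int) (out : List Int) : Prop := out = findMaximalPoints_alt pointList
instance (pointList : List Int) (out : List Int) : Decidable (Spec_findMaximalPoints pointList out) := by unfold Spec_findMaximalPoints; infer_instance

-- ===== CLAIM (what is proved, stated in full; the proofs are below) =====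
def Claim_equal_findMaximalPoints : Prop := ∀ (pointList : List Int), Dom_findMaximalPoints pointList → Spec_findMaximalPoints pointList (findMaximalPoints pointList)

-- ===== LEMMAS AND PROOFS =====

-- ===== VERDICT (by name: the statement is the Claim_ definition above) =====
-- the fold of "if x > best then x else best" is max, and it bounds every element
theorem foldl_max_eq (l : List Int) (b : Int) :
    l.foldl (fun best x => if x > best then x else best) b = l.foldl max b := by
  induction l generalizing b with
  | nil => rfl
  | cons h t ih =>
      simp only [List.foldl]
      rw [ih]
      congr 1
      by_cases hb : h > b
      · simp [hb, max_eq_right (le_of_lt hb)]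
      · simp [hb, max_eq_left (le_of_not_gt hb)]

theorem base_le_foldl_max (l : List Int) (b : Int) : b ≤ l.foldl max b := by
  induction l generalizing b with
  | nil => simp
  | cons h t ih => exact (le_max_left b h).trans (ih (max b h))

theorem le_foldl_max (l : List Int) (x : Int) (hx : x ∈ l) (b : Int) :
    x ≤ l.foldl max b := by
  induction l generalizing b with
  | nil => simp at hx
  | cons h t ih =>
      simp only [List.foldl]
      rcases List.mem_cons.mp hx with h1 | h1
      · subst h1; exact (le_max_right b x).trans (base_le_foldl_max t _)
      · exact ih h1 _

theorem foldl_max_mem (l : List Int) (b : Int) :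
    l.foldl max b ∈ l ∨ l.foldl max b = b := by
  induction l generalizing b with
  | nil => simp
  | cons h t ih =>
      simp only [List.foldl]
      rcases ih (max b h) with h1 | h1
      · exact Or.inl (List.mem_cons_of_mem _ h1)
      · rcases max_choice b h with h2 | h2
        · exact Or.inr (h1.trans h2)
        · rw [h2] at h1 ⊢
          exact Or.inl (by simp [h1])

theorem findMaximalPoints_spec : Claim_equal_findMaximalPoints := by
  intro pointList _
  unfold Spec_findMaximalPoints findMaximalPoints findMaximalPoints_alt
  cases pointList with
  | nil => rfl
  | cons p0 rest =>
      simp only [foldl_max_eq]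
      set m := rest.foldl max p0 with hm
      have hub : ∀ x ∈ p0 :: rest, x ≤ m := by
        intro x hx
        rcases List.mem_cons.mp hx with h | h
        · exact h ▸ base_le_foldl_max rest p0
        · exact le_foldl_max rest x h p0
      have hmem : m ∈ p0 :: rest := by
        rcases foldl_max_mem rest p0 with h | h
        · exact List.mem_cons_of_mem _ h
        · exact List.mem_cons.mpr (Or.inl h)
      have key : ∀ c ∈ p0 :: rest,
          (!(p0 :: rest).any (fun o => o > c)) = (c == m) := by
        intro c hc
        by_cases hcm : c = m
        · subst hcm
          simp only [beq_self_eq_true]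
          simp only [Bool.not_eq_eq_eq_not, Bool.not_true, List.any_eq_false]
          intro o ho
          simp [not_lt.mpr (hub o ho)]
        · have : (p0 :: rest).any (fun o => o > c) = true := by
            refine List.any_eq_true.mpr ⟨m, hmem, ?_⟩
            simp [lt_of_le_of_ne (hub c hc) hcm]
          simp [this, hcm]
      calc (p0 :: rest).foldl
            (fun acc c =>
              let fg := (p0 :: rest).any (fun o => o > c)
              if !fg then acc ++ [c] else acc) []
          = [] ++ (p0 :: rest).filter (fun c => !(p0 :: rest).any (fun o => o > c)) :=
            PySem.List.foldl_append_if_eq_filter _ _ _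
        _ = (p0 :: rest).filter (fun c => c == m) := by
            rw [List.nil_append]
            exact List.filter_congr key
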